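-- pv_equiv track=rewrite | github.com/esther-poniatowski/glossa | src/glossa/domain/parsing.py | _count_trailing_blank
-- ===== SOURCE A (Python) =====
-- def _count_trailing_blank(lines: list[str]) -> int:
--     count = 0
--     for line in reversed(lines):
--         if line.strip():
--             break
--         count += 1
--     if count > 0 and lines and lines[-1] == "":
--         count = max(0, count - 1)
--     return count
-- ===== SOURCE B (Python) =====
-- def _count_trailing_blank(lines: list[str]) -> int:
--     count = 0
--     for line in lines:
--         count = 0 if line.strip() else count + 1
--     if count > 0 and lines and lines[-1] == "":
--         count = max(0, count - 1)
--     return count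
-- ===== Notes on version B (the rewrite author's own statement) =====
-- stated objective: alternative
-- what changed: Single forward pass with a counter that resets on every non-blank line, instead of scanning the reversed list backward with an early break; the tail adjustment is unchanged.
import Mathlib
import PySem

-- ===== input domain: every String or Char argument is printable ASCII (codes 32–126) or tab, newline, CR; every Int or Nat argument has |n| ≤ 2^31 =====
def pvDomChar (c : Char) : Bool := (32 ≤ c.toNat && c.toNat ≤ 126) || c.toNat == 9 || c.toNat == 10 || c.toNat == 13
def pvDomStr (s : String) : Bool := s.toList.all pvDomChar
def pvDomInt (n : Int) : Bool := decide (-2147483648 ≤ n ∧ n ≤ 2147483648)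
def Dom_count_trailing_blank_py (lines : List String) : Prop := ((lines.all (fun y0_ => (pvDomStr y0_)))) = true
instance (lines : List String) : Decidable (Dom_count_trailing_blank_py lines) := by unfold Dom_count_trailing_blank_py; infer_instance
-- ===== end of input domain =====

-- B replaces A's backward scan-with-break by one forward pass whose counter resets on non-blank lines (alternative decomposition, same cost).

-- ===== PORT A =====
-- the for-loop over reversed(lines) with break: count blank lines until the first line with non-empty strip
def ctbLoopA : List String → Int
  | [] => 0
  | l :: rest => if PySem.Str.strip l ≠ "" then 0 else ctbLoopA rest + 1

def count_trailing_blank_py (lines : List String) : Int :=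
  let count := ctbLoopA lines.reverse
  if count > 0 ∧ lines ≠ [] ∧ PySem.List.pyGet? lines (-1) = some "" then max 0 (count - 1)
  else count

-- ===== PORT B =====
def count_trailing_blank_py_alt (lines : List String) : Int :=
  let count := lines.foldl (fun c l => if PySem.Str.strip l ≠ "" then 0 else c + 1) 0
  if count > 0 ∧ lines ≠ [] ∧ PySem.List.pyGet? lines (-1) = some "" then max 0 (count - 1)
  else count

-- ===== PRECONDITION & SPEC =====
def Spec_count_trailing_blank_py (lines : List String) (out : Int) : Prop := out = count_trailing_blank_py_alt lines
instance (lines : List String) (out : Int) : Decidable (Spec_count_trailing_blank_py lines out) := by unfold Spec_count_trailing_blank_py; infer_instance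

-- ===== CLAIM (what is proved, stated in full; the proofs are below) =====
def Claim_equal_count_trailing_blank_py : Prop := ∀ (lines : List String), Dom_count_trailing_blank_py lines → Spec_count_trailing_blank_py lines (count_trailing_blank_py lines)

-- ===== LEMMAS AND PROOFS =====

-- ===== VERDICT (by name: the statement is the Claim_ definition above) =====
-- the forward fold with reset equals A's backward scan of the reversed list
theorem ctb_fold_eq_loop (lines : List String) :
    lines.foldl (fun c l => if PySem.Str.strip l ≠ "" then 0 else c + 1) 0
      = ctbLoopA lines.reverse := by
  induction lines using List.reverseRecOn with
  | nil => rfl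
  | append_singleton xs x ih =>
      rw [List.foldl_append, List.reverse_append]
      simp only [List.foldl_cons, List.foldl_nil, List.reverse_singleton,
        List.singleton_append, ctbLoopA, ih]

theorem count_trailing_blank_py_spec : Claim_equal_count_trailing_blank_py := by
  intro lines _
  unfold Spec_count_trailing_blank_py count_trailing_blank_py count_trailing_blank_py_alt
  rw [ctb_fold_eq_loop]
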